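-- pv_equiv track=rewrite | github.com/dongjinleekr/docw | sbin/update_registry.py | remove_host_entry
-- ===== SOURCE A (Python) =====
-- import copy
--
-- def remove_host_entry(data, hostname):
-- 	ret = copy.deepcopy(data)
-- 	e = next((entry for entry in ret['entries'] if entry['hostname'] == hostname), None)
--
-- 	if e:
-- 		ret['entries'].remove(e)
-- 		return ret
-- 	else:
-- 		raise ValueError('Duplicated hostname')
-- ===== SOURCE B (Python) =====
-- import copy
--
-- def remove_host_entry(data, hostname):
-- 	ret = copy.deepcopy(data)
-- 	new_entries = []
-- 	removed = False
-- 	for entry in ret['entries']: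
-- 		if not removed and entry['hostname'] == hostname:
-- 			removed = True
-- 		else:
-- 			new_entries.append(entry)
-- 	if not removed:
-- 		raise ValueError('Duplicated hostname')
-- 	ret['entries'] = new_entries
-- 	return ret
-- ===== Notes on version B (the rewrite author's own statement) =====
-- stated objective: simpler
-- what changed: Replaces A's two-scan locate-then-remove-by-value (generator find + list.remove) with a single flag-gated pass that rebuilds the entries list while skipping the first matching entry.
import Mathlib
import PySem

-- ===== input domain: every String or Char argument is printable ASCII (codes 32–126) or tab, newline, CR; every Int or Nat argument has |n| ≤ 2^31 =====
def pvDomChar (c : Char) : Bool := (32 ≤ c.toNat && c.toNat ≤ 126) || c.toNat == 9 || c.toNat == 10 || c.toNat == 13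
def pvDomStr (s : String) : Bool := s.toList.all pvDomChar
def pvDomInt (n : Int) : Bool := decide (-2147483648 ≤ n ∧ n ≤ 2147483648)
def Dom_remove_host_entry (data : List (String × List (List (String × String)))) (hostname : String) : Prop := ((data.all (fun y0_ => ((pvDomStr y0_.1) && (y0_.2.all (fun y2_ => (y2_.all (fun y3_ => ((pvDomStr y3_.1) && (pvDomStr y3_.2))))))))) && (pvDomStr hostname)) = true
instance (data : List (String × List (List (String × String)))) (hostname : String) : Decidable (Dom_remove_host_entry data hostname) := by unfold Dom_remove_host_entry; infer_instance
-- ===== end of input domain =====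

-- B replaces A's locate-then-remove-by-value two-scan with a single flag-gated rebuild pass (simpler, same cost).


-- dict value update in place: replace the value at the first occurrence of the key (Python dict assignment / in-place list mutation)
def pvAssocSet (d : List (String × List (List (String × String)))) (k : String) (v : List (List (String × String))) : List (String × List (List (String × String))) :=
  match d with
  | [] => []
  | (k', v') :: rest => if k' == k then (k', v) :: rest else (k', v') :: pvAssocSet rest k v

-- ===== PORT A =====
-- ret['entries'] → List.lookup (first match); the generator/next → List.find?; list.remove(e) → PySem.List.remove?.
-- On inputs where Python raises (KeyError on 'entries' or an entry's 'hostname', ValueError when no entry matches)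
-- the port returns `data`; those inputs are excluded by Pre_remove_host_entry.
def remove_host_entry (data : List (String × List (List (String × String)))) (hostname : String) : List (String × List (List (String × String))) :=
  match data.lookup "entries" with
  | none => data
  | some es =>
    match es.find? (fun entry => entry.lookup "hostname" == some hostname) with
    | none => data
    | some e =>
      match PySem.List.remove? es e with
      | none => data
      | some es' => pvAssocSet data "entries" es'

-- ===== PORT B =====
-- the flag-gated single rebuild pass: skip the first entry whose 'hostname' matches, keep everything else;
-- none = the flag stayed False (Python B raises ValueError there, excluded by Pre_remove_host_entry)
def pvRemoveFirst (hostname : String) : List (List (String × String)) → Option (List (List (String × String)))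
  | [] => none
  | e :: rest =>
    if e.lookup "hostname" == some hostname then some rest
    else (pvRemoveFirst hostname rest).map (e :: ·)

def remove_host_entry_alt (data : List (String × List (List (String × String)))) (hostname : String) : List (String × List (List (String × String))) :=
  match data.lookup "entries" with
  | none => data
  | some es =>
    match pvRemoveFirst hostname es with
    | none => data
    | some es' => pvAssocSet data "entries" es'

-- ===== PRECONDITION & SPEC =====
-- Pre_ = exactly the inputs where Python A returns: an 'entries' key exists, some entry matches the hostname,
-- and every entry scanned before the first match has a 'hostname' key (otherwise KeyError/ValueError).
def Pre_remove_host_entry (data : List (String × List (List (String × String)))) (hostname : String) : Prop :=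
  (data.lookup "entries").isSome = true ∧
  (∃ i < ((data.lookup "entries").getD []).length,
    (((data.lookup "entries").getD [])[i]!.lookup "hostname" = some hostname) ∧
    ∀ j < i, (((data.lookup "entries").getD [])[j]!.lookup "hostname").isSome = true)
instance (data : List (String × List (List (String × String)))) (hostname : String) : Decidable (Pre_remove_host_entry data hostname) := by unfold Pre_remove_host_entry; infer_instance

def pvWitness_remove_host_entry : (List (String × List (List (String × String)))) × String :=
  ([("entries", [[("hostname", "a")], [("hostname", "b")]])], "b")

def Spec_remove_host_entry (data : List (String × List (List (String × String)))) (hostname : String) (out : List (String × List (List (String × String)))) : Prop := out = remove_host_entry_alt data hostname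
instance (data : List (String × List (List (String × String)))) (hostname : String) (out : List (String × List (List (String × String)))) : Decidable (Spec_remove_host_entry data hostname out) := by unfold Spec_remove_host_entry; infer_instance

-- ===== CLAIM (what is proved, stated in full; the proofs are below) =====
def Claim_equal_remove_host_entry : Prop := ∀ (data : List (String × List (List (String × String)))) (hostname : String), Dom_remove_host_entry data hostname → Pre_remove_host_entry data hostname → Spec_remove_host_entry data hostname (remove_host_entry data hostname)

-- ===== LEMMAS AND PROOFS =====

-- B's one-pass rebuild computes the same option as A's find?-then-remove? pair.
theorem pvRemoveFirst_eq_find_remove (hostname : String) (es : List (List (String × String))) :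
    pvRemoveFirst hostname es =
      match es.find? (fun entry => entry.lookup "hostname" == some hostname) with
      | none => none
      | some e => PySem.List.remove? es e := by
  induction es with
  | nil => rfl
  | cons a rest ih =>
    by_cases h : (a.lookup "hostname" == some hostname) = true
    · simp [pvRemoveFirst, h, PySem.List.remove?_cons_self]
    · rw [List.find?_cons_of_neg (by simpa using h)]
      simp only [pvRemoveFirst, if_neg h, ih]
      cases hf : rest.find? (fun entry => entry.lookup "hostname" == some hostname) with
      | none => rfl
      | some e =>
        have hpe := List.find?_some hf
        have hne : a ≠ e := by
          intro hae; rw [hae] at h; exact h hpe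
        simp [PySem.List.remove?_cons_of_ne rest hne]

theorem ports_eq (data : List (String × List (List (String × String)))) (hostname : String) :
    remove_host_entry data hostname = remove_host_entry_alt data hostname := by
  unfold remove_host_entry remove_host_entry_alt
  cases data.lookup "entries" with
  | none => rfl
  | some es =>
    simp only [pvRemoveFirst_eq_find_remove]
    cases es.find? (fun entry => entry.lookup "hostname" == some hostname) <;> rfl

-- ===== VERDICT (by name: the statement is the Claim_ definition above) =====
theorem remove_host_entry_spec : Claim_equal_remove_host_entry := by
  intro data hostname _ _
  exact ports_eq data hostname
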